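-- pv_equiv track=rewrite | github.com/xuc607/pdf_to_excel_convertor | first_stage_ETL.py | join_brackets
-- ===== SOURCE A (Python) =====
-- def join_brackets(x):
--
--     brackets_list = [] #Joining up lines where bracketed terms have been split
--     new_line = []
--     for a in range(len(x)):
--         if '(' in x[a]:
--             if ')' in x[a]:
--                 pass
--             elif any(')' in term for term in x[a:]):    #Finding brackets that haven't been closed
--                     next_closed_br = [i for i, x in enumerate(')' in term for term in x[a:]) if x][0]
--                     if any('(' in term for term in x[a+1:a+next_closed_br+1]) == False:
--                         brackets_list.append([a, a + next_closed_br+1])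
--     start = 0
--     if brackets_list != []:
--         for i in range(len(brackets_list)):
--             new_line += x[start:brackets_list[i][0]]
--             new_line += [''.join(x[brackets_list[i][0]:brackets_list[i][1]])]
--
--             start = brackets_list[i][1]
--         new_line += x[start:]
--     else:
--         new_line = x
--
--     return new_line
-- ===== SOURCE B (Python) =====
-- def join_brackets(x):
--     # One backward pass precomputes, per line, the length of the merge block
--     # starting there (if any); one forward pass emits the output directly.
--     n = len(x)
--     info = [None] * n   # info[i] = j - i where j is the closing line's index, when a merge starts at i
--     nxt = None          # distance from the line after the current one to the nearest ')' line at or after it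
--     blocked = False     # '(' occurs somewhere in that stretch up to and including the ')' line
--     for i in range(n - 1, -1, -1):
--         s = x[i]
--         if '(' in s and ')' not in s and nxt is not None and not blocked:
--             info[i] = nxt + 1
--         if ')' in s:
--             nxt, blocked = 0, '(' in s
--         elif nxt is not None:
--             nxt, blocked = nxt + 1, blocked or '(' in s
--     out, i = [], 0
--     while i < n:
--         d = info[i]
--         if d is None:
--             out.append(x[i])
--             i += 1
--         else:
--             out.append(''.join(x[i:i + d + 1]))
--             i += d + 1
--     return out
-- ===== Notes on version B (the rewrite author's own statement) =====
-- stated objective: alternative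
-- what changed: Replaces A's per-line forward rescans (slicing the suffix and enumerating it to find the next closing line, then re-scanning for opens) with one backward pass that precomputes each line's merge-block length and one forward pass that emits the output directly, instead of building an interval list and splicing it afterwards; it trades A's worst-case rescans for two fixed linear passes.
import Mathlib
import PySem

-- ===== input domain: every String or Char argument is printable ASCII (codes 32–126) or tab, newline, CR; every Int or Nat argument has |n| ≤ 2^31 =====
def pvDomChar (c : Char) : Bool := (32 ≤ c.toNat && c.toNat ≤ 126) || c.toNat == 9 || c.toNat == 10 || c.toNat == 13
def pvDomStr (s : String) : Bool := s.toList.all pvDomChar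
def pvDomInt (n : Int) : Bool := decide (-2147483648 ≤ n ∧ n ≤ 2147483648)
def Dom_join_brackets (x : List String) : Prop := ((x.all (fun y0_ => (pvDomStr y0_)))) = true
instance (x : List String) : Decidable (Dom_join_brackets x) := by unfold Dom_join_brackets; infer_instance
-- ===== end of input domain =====

-- B merges split-bracket lines by a different algorithm: one backward pass precomputing each
-- line's merge-block length and one forward pass emitting the output, instead of A's per-line
-- suffix rescans followed by interval splicing.

-- ===== PORT A =====
def join_brackets (x : List String) : List String :=
  let bracketsList : List (Int × Int) :=
    (PySem.List.pyRange 0 (x.length : Int) 1).foldl (fun bl a =>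
      let xa := PySem.List.pyGetD x a ""
      if PySem.Str.isIn "(" xa then
        if PySem.Str.isIn ")" xa then bl
        else if (PySem.List.slice x (some a) none).any (fun term => PySem.Str.isIn ")" term) then
          let nextClosedBr : Int :=
            PySem.List.pyGetD
              (((PySem.List.enumerate ((PySem.List.slice x (some a) none).map
                  (fun term => PySem.Str.isIn ")" term)) 0).filter (fun p => p.2)).map
                (fun p => p.1)) 0 0
          if ((PySem.List.slice x (some (a + 1)) (some (a + nextClosedBr + 1))).any
              (fun term => PySem.Str.isIn "(" term)) = false then
            bl ++ [(a, a + nextClosedBr + 1)]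
          else bl
        else bl
      else bl) []
  if bracketsList ≠ [] then
    let fin := bracketsList.foldl (fun (st : Int × List String) iv =>
      (iv.2, st.2 ++ PySem.List.slice x (some st.1) (some iv.1)
            ++ [PySem.Str.join "" (PySem.List.slice x (some iv.1) (some iv.2))])) (0, [])
    fin.2 ++ PySem.List.slice x (some fin.1) none
  else x

-- ===== PORT B =====
-- backward pass of Source B: returns ((nxt, blocked), info)
def joinBracketsBuild : List String → (Option Nat × Bool) × List (Option Nat)
  | [] => ((none, false), [])
  | s :: t =>
    let r := joinBracketsBuild t
    let v : Option Nat :=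
      if PySem.Str.isIn "(" s && !PySem.Str.isIn ")" s && r.1.1.isSome && !r.1.2 then
        r.1.1.map (· + 1)
      else none
    let st : Option Nat × Bool :=
      if PySem.Str.isIn ")" s then (some 0, PySem.Str.isIn "(" s)
      else
        match r.1.1 with
        | some k => (some (k + 1), r.1.2 || PySem.Str.isIn "(" s)
        | none => (none, r.1.2)
    (st, v :: r.2)

-- forward pass of Source B (the while loop; each iteration consumes the info entries it passes)
def joinBracketsWalk (x : List String) (i : Nat) : List (Option Nat) → List String
  | [] => []
  | none :: rest => PySem.List.pyGetD x (i : Int) "" :: joinBracketsWalk x (i + 1) rest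
  | some d :: rest =>
      PySem.Str.join "" (PySem.List.slice x (some (i : Int)) (some ((i + d + 1 : Nat) : Int)))
        :: joinBracketsWalk x (i + d + 1) (rest.drop d)
  termination_by info => info.length
  decreasing_by
    all_goals simp
    all_goals omega

def join_brackets_alt (x : List String) : List String :=
  joinBracketsWalk x 0 (joinBracketsBuild x).2

-- ===== PRECONDITION & SPEC =====
def Spec_join_brackets (x : List String) (out : List String) : Prop := out = join_brackets_alt x
instance (x : List String) (out : List String) : Decidable (Spec_join_brackets x out) := by unfold Spec_join_brackets; infer_instance

-- ===== CLAIM (what is proved, stated in full; the proofs are below) =====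
def Claim_equal_join_brackets : Prop := ∀ (x : List String), Dom_join_brackets x → Spec_join_brackets x (join_brackets x)

-- ===== LEMMAS AND PROOFS =====

def pvHasC (s : String) : Bool := PySem.Str.isIn ")" s
def pvHasO (s : String) : Bool := PySem.Str.isIn "(" s
def pvFIdx (l : List String) : Option Nat := l.findIdx? pvHasC
def pvBlk (l : List String) : Bool :=
  match pvFIdx l with
  | none => false
  | some k => (l.take (k + 1)).any pvHasO

-- closed-form of B's info array
def pvInfo : List String → List (Option Nat)
  | [] => []
  | s :: t =>
      (if pvHasO s && !pvHasC s && (pvFIdx t).isSome && !pvBlk t then (pvFIdx t).map (· + 1)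
       else none) :: pvInfo t

-- intervals (absolute indices) read off an info list
def pvIv (i : Nat) : List (Option Nat) → List (Nat × Nat)
  | [] => []
  | none :: rest => pvIv (i + 1) rest
  | some d :: rest => (i, i + d + 1) :: pvIv (i + 1) rest

-- recursive form of A's splicing loop
def pvMT (x : List String) (start : Nat) : List (Nat × Nat) → List String
  | [] => x.drop start
  | (p, q) :: rest =>
      (x.drop start).take (p - start)
        ++ PySem.Str.join "" ((x.drop p).take (q - p)) :: pvMT x q rest

-- well-formedness of an info list: a block of length d+1 is followed by d blanks
def pvGood : List (Option Nat) → Prop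
  | [] => True
  | none :: rest => pvGood rest
  | some d :: rest => d ≤ rest.length ∧ (∀ e ∈ rest.take d, e = none) ∧ pvGood rest

-- what A's loop body appends at (Nat) index a
def pvBodyN (x : List String) (a : Nat) : Option (Nat × Nat) :=
  let xa := x.getD a ""
  if pvHasO xa && !pvHasC xa then
    match pvFIdx (x.drop (a + 1)) with
    | some k => if pvBlk (x.drop (a + 1)) then none else some (a, a + k + 2)
    | none => none
  else none

-- A's loop body as an Option producer (Int index, literally A's expressions)
def pvBodyI (x : List String) (a : Int) : Option (Int × Int) :=
  let xa := PySem.List.pyGetD x a ""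
  if PySem.Str.isIn "(" xa then
    if PySem.Str.isIn ")" xa then none
    else if (PySem.List.slice x (some a) none).any (fun term => PySem.Str.isIn ")" term) then
      let nextClosedBr : Int :=
        PySem.List.pyGetD
          (((PySem.List.enumerate ((PySem.List.slice x (some a) none).map
              (fun term => PySem.Str.isIn ")" term)) 0).filter (fun p => p.2)).map
            (fun p => p.1)) 0 0
      if ((PySem.List.slice x (some (a + 1)) (some (a + nextClosedBr + 1))).any
          (fun term => PySem.Str.isIn "(" term)) = false then
        some (a, a + nextClosedBr + 1)
      else none
    else none
  else none

lemma pv_foldl_opt {α β : Type} (f : α → Option β) (g : List β → α → List β)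
    (hg : ∀ acc a, g acc a = acc ++ (f a).toList) :
    ∀ (l : List α) (acc : List β), l.foldl g acc = acc ++ l.filterMap f := by
  intro l
  induction l with
  | nil => intro acc; simp
  | cons a l ih =>
      intro acc
      simp only [List.foldl_cons, List.filterMap_cons, hg]
      cases h : f a <;> simp [ih, h]

-- the enumerate/filter/head chain finds the first true index
lemma pv_enum_head (l : List Bool) : ∀ (s : Int),
    ((((PySem.List.enumerate l s).filter (fun p => p.2)).map (fun p => p.1)).head?) =
      (l.findIdx? id).map (fun k => s + (k : Int)) := by
  induction l with
  | nil => intro s; simp [PySem.List.enumerate]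
  | cons b l ih =>
      intro s
      rw [PySem.List.enumerate_cons]
      cases b with
      | true => simp [List.findIdx?_cons]
      | false =>
          simp only [List.filter_cons]
          simp only [List.findIdx?_cons]
          simp [ih (s + 1)]
          cases List.findIdx? id l <;> simp <;> ring
  
lemma pv_findIdx?_map {α : Type} (c : α → Bool) (l : List α) :
    (l.map c).findIdx? id = l.findIdx? c := by
  induction l with
  | nil => rfl
  | cons a l ih => simp [List.findIdx?_cons, ih]

lemma pv_findIdx?_isSome {α : Type} (p : α → Bool) (l : List α) :
    (l.findIdx? p).isSome = l.any p := by
  induction l with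
  | nil => rfl
  | cons a l ih =>
      by_cases h : p a <;> simp [List.findIdx?_cons, h, ih]

lemma pv_findIdx?_lt {α : Type} (p : α → Bool) (l : List α) (k : Nat)
    (h : l.findIdx? p = some k) : k < l.length := by
  induction l generalizing k with
  | nil => simp at h
  | cons a l ih =>
      rw [List.findIdx?_cons] at h
      by_cases hp : p a
      · simp [hp] at h; simp [← h]
      · simp [hp] at h
        obtain ⟨m, hm, rfl⟩ := h
        have := ih m hm
        simp only [List.length_cons]; omega

lemma pv_drop_eq_getD_cons' (x : List String) (i : Nat) (hi : i < x.length) :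
    x.drop i = x.getD i "" :: x.drop (i + 1) := by
  rw [List.getD_eq_getElem x "" hi]
  exact List.drop_eq_getElem_cons hi

lemma pv_hasC_fun : (fun term => PySem.Str.isIn ")" term) = pvHasC := rfl
lemma pv_hasO_fun : (fun term => PySem.Str.isIn "(" term) = pvHasO := rfl

lemma pvBodyI_cast (x : List String) (a : Nat) (ha : a < x.length) :
    pvBodyI x (a : Int) = (pvBodyN x a).map (fun p => ((p.1 : Int), (p.2 : Int))) := by
  have hget : PySem.List.pyGetD x (a : Int) "" = x.getD a "" := by simp
  have hslice : PySem.List.slice x (some (a : Int)) none = x.drop a :=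
    PySem.List.slice_from_natCast x a
  simp only [pvBodyI, pvBodyN, hget, hslice, pv_hasC_fun, pv_hasO_fun]
  simp only [List.getD_eq_getElem?_getD]
  have hdrop : x.drop a = x[a]?.getD "" :: x.drop (a + 1) := by
    rw [← List.getD_eq_getElem?_getD]
    exact pv_drop_eq_getD_cons' x a ha
  set y := x[a]?.getD "" with hy
  by_cases ho : pvHasO y = true
  swap
  · have ho' : pvHasO y = false := by simpa using ho
    simp [ho']
  by_cases hc : pvHasC y = true
  · simp [ho, hc]
  have hc' : pvHasC y = false := by simpa using hc
  have hcond : (pvHasO y && !pvHasC y) = true := by simp [ho, hc']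
  have hany : ((x.drop a).any fun term => pvHasC term) = ((x.drop (a + 1)).any fun term => pvHasC term) := by
    rw [hdrop]
    simp only [List.any_cons, hc', Bool.false_or]
  cases hf : pvFIdx (x.drop (a + 1)) with
  | none =>
      have hno : ((x.drop a).any fun term => pvHasC term) = false := by
        rw [hany, ← pv_findIdx?_isSome (fun term => pvHasC term)]
        rw [show ((x.drop (a + 1)).findIdx? fun term => pvHasC term) = none from hf]
        rfl
      simp [ho, hc', hcond, hno]
  | some k =>
      have hanyT : ((x.drop a).any fun term => pvHasC term) = true := by
        rw [hany, ← pv_findIdx?_isSome (fun term => pvHasC term)]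
        rw [show ((x.drop (a + 1)).findIdx? fun term => pvHasC term) = some k from hf]
        rfl
      simp only [ho, hc', hcond, hanyT, Bool.false_eq_true, eq_self_iff_true, if_true, if_false]
      have hfidx : ((x.drop a).findIdx? fun term => pvHasC term) = some (k + 1) := by
        rw [hdrop, List.findIdx?_cons, if_neg (by exact hc)]
        rw [show ((x.drop (a + 1)).findIdx? fun term => pvHasC term) = some k from hf]
        rfl
      have hnc : PySem.List.pyGetD
          (((PySem.List.enumerate ((x.drop a).map fun term => pvHasC term) 0).filter
            (fun p => p.2)).map (fun p => p.1)) 0 0 = ((k + 1 : Nat) : Int) := by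
        have hh := pv_enum_head ((x.drop a).map fun term => pvHasC term) 0
        rw [pv_findIdx?_map, hfidx] at hh
        rw [PySem.List.pyGetD_zero, List.getD_eq_getElem?_getD, ← List.head?_eq_getElem?, hh]
        simp
      rw [hnc]
      have hcast : (a : Int) + ((k + 1 : Nat) : Int) + 1 = ((a + k + 2 : Nat) : Int) := by
        push_cast; ring
      have hcast1 : (a : Int) + 1 = ((a + 1 : Nat) : Int) := by push_cast; ring
      rw [hcast, hcast1, PySem.List.slice_natCast]
      have htk : a + k + 2 - (a + 1) = k + 1 := by omega
      rw [htk]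
      have hblk : pvBlk (x.drop (a + 1)) = ((x.drop (a + 1)).take (k + 1)).any fun term => pvHasO term := by
        have hf' : List.findIdx? pvHasC (x.drop (a + 1)) = some k := hf
        simp [pvBlk, pvFIdx, hf']
      by_cases hb : (((x.drop (a + 1)).take (k + 1)).any fun term => pvHasO term) = true
      · rw [show pvBlk (x.drop (a + 1)) = true by rw [hblk, hb]]
        simp [hb]
      · have hb' : (((x.drop (a + 1)).take (k + 1)).any fun term => pvHasO term) = false := by
          simpa using hb
        rw [show pvBlk (x.drop (a + 1)) = false by rw [hblk, hb']]
        simp only [hb', Bool.false_eq_true, if_false, Option.map_some]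
        have hc2 : ((a + k + 2 : Nat) : Int) = (a : Int) + ((k + 1 : Nat) : Int) + 1 := by
          push_cast; ring
        simp [← hc2]

lemma pvBodyN_shift (s : String) (t : List String) (a : Nat) :
    pvBodyN (s :: t) (a + 1) = (pvBodyN t a).map (fun p => (p.1 + 1, p.2 + 1)) := by
  simp only [pvBodyN, List.getD_cons_succ, List.drop_succ_cons]
  by_cases h : (pvHasO (t.getD a "") && !pvHasC (t.getD a "")) = true
  · simp only [h, if_true]
    cases hf : pvFIdx (t.drop (a + 1)) with
    | none => simp
    | some k => by_cases hb : pvBlk (t.drop (a + 1)) <;> simp [hb] <;> omega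
  · have hx : t.getD a "" = t[a]?.getD "" := List.getD_eq_getElem?_getD
    rw [hx] at h
    simp only [Bool.and_eq_true, Bool.not_eq_true'] at h
    simp [h]

lemma pvIv_succ (l : List (Option Nat)) : ∀ (i : Nat),
    pvIv (i + 1) l = (pvIv i l).map (fun p => (p.1 + 1, p.2 + 1)) := by
  induction l with
  | nil => intro i; rfl
  | cons o rest ih =>
      intro i
      cases o <;> simp [pvIv, ih] <;> omega

lemma pv_range_filterMap (x : List String) :
    (List.range x.length).filterMap (pvBodyN x) = pvIv 0 (pvInfo x) := by
  induction x with
  | nil => rfl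
  | cons s t ih =>
      rw [List.length_cons, List.range_succ_eq_map, List.filterMap_cons, List.filterMap_map]
      have h1 : (List.range t.length).filterMap (pvBodyN (s :: t) ∘ Nat.succ)
          = (List.range t.length).filterMap (fun a => (pvBodyN t a).map (fun p => (p.1 + 1, p.2 + 1))) := by
        apply List.filterMap_congr
        intro a _
        exact pvBodyN_shift s t a
      rw [h1, ← List.map_filterMap, ih, ← pvIv_succ]
      have hhead : pvBodyN (s :: t) 0
          = (if pvHasO s && !pvHasC s && (pvFIdx t).isSome && !pvBlk t then (pvFIdx t).map (· + 1)
             else none).map (fun d => (0, d + 1)) := by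
        simp only [pvBodyN, List.getD_cons_zero, List.drop_succ_cons, List.drop_zero]
        by_cases h : (pvHasO s && !pvHasC s) = true
        · cases hf : pvFIdx t with
          | none => simp [h, hf]
          | some k => by_cases hb : pvBlk t <;> simp [h, hf, hb]
        · simp only [h, if_false]
          have : (pvHasO s && !pvHasC s && (pvFIdx t).isSome && !pvBlk t) = false := by
            cases ho : pvHasO s <;> cases hc : pvHasC s <;> simp_all
          simp [this]
      rw [hhead]
      simp only [pvInfo]
      cases hentry : (if pvHasO s && !pvHasC s && (pvFIdx t).isSome && !pvBlk t then (pvFIdx t).map (· + 1)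
             else none) with
      | none => simp [pvIv]
      | some d => simp [pvIv]

-- B-side characterization
lemma pv_hasC_eq (s : String) : PySem.Str.isIn ")" s = pvHasC s := rfl
lemma pv_hasO_eq (s : String) : PySem.Str.isIn "(" s = pvHasO s := rfl

lemma pvBuild_fst (t : List String) :
    (joinBracketsBuild t).1 = (pvFIdx t, pvBlk t) := by
  induction t with
  | nil => rfl
  | cons s t ih =>
      simp only [joinBracketsBuild, ih, pv_hasC_eq, pv_hasO_eq]
      by_cases hc : pvHasC s
      · simp [hc, pvFIdx, pvBlk, List.findIdx?_cons]
      · cases hf : pvFIdx t with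
        | none =>
            have hb : pvBlk t = false := by simp [pvBlk, hf]
            have hf' : List.findIdx? pvHasC t = none := hf
            have : pvFIdx (s :: t) = none := by
              simp [pvFIdx, List.findIdx?_cons, hc, hf']
            simp [hc, hf, hb, this, pvBlk]
        | some k =>
            have : pvFIdx (s :: t) = some (k + 1) := by
              simp [pvFIdx, List.findIdx?_cons, hc] at *
              simp [hf]
            simp only [hc, hf, this]
            simp only [pvBlk, this, hf, List.take_succ_cons, List.any_cons]
            simp [Bool.or_comm]

lemma pvBuild_snd (t : List String) :
    (joinBracketsBuild t).2 = pvInfo t := by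
  induction t with
  | nil => rfl
  | cons s t ih =>
      simp only [joinBracketsBuild, pvInfo, pvBuild_fst t, ih, pv_hasC_eq, pv_hasO_eq]

lemma pvInfo_length (t : List String) : (pvInfo t).length = t.length := by
  induction t with
  | nil => rfl
  | cons s t ih => simp [pvInfo, ih]

lemma pvInfo_take_none (t : List String) : ∀ (m : Nat),
    (t.take m).any pvHasO = false → ∀ e ∈ (pvInfo t).take m, e = none := by
  induction t with
  | nil => intro m _ e he; simp [pvInfo] at he
  | cons s t ih =>
      intro m hm e he
      cases m with
      | zero => simp at he
      | succ m =>
          simp only [List.take_succ_cons, List.any_cons, Bool.or_eq_false_iff] at hm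
          simp only [pvInfo, List.take_succ_cons, List.mem_cons] at he
          rcases he with rfl | he
          · simp [hm.1]
          · exact ih m hm.2 e he

lemma pvGood_tail (l : List (Option Nat)) (h : pvGood l) : pvGood l.tail := by
  cases l with
  | nil => trivial
  | cons o rest => cases o <;> simp [pvGood] at h ⊢ <;> tauto

lemma pvGood_drop (l : List (Option Nat)) (h : pvGood l) (k : Nat) : pvGood (l.drop k) := by
  induction k with
  | zero => simpa using h
  | succ k ih => rw [← List.tail_drop]; exact pvGood_tail _ ih

lemma pvGood_pvInfo (t : List String) : pvGood (pvInfo t) := by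
  induction t with
  | nil => trivial
  | cons s t ih =>
      simp only [pvInfo]
      by_cases h : (pvHasO s && !pvHasC s && (pvFIdx t).isSome && !pvBlk t) = true
      · cases hf : pvFIdx t with
        | none => simp [hf] at h
        | some k =>
            rw [hf] at h
            simp only [hf, h, if_true, Option.map_some, pvGood]
            refine ⟨?_, ?_, ih⟩
            · have := pv_findIdx?_lt pvHasC t k hf
              simp [pvInfo_length]; omega
            · intro e he
              apply pvInfo_take_none t (k + 1) _ e he
              have hb : pvBlk t = false := by
                simp at h; tauto
              
              simpa [pvBlk, hf] using hb
      · simp only [h, if_neg, Bool.false_eq_true, not_false_iff]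
        simpa [pvGood] using ih

lemma pvIv_ge (l : List (Option Nat)) : ∀ (i : Nat) (p : Nat × Nat), p ∈ pvIv i l → i ≤ p.1 := by
  induction l with
  | nil => intro i p h; simp [pvIv] at h
  | cons o rest ih =>
      intro i p h
      cases o with
      | none => have := ih (i + 1) p h; omega
      | some d =>
          simp [pvIv] at h
          rcases h with h | h
          · simp [h]
          · have := ih (i + 1) p h; omega

lemma pvIv_append_none (l1 : List (Option Nat)) : ∀ (l2 : List (Option Nat)) (i : Nat),
    (∀ e ∈ l1, e = none) → pvIv i (l1 ++ l2) = pvIv (i + l1.length) l2 := by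
  induction l1 with
  | nil => intro l2 i _; simp
  | cons o rest ih =>
      intro l2 i h
      have ho : o = none := h o (by simp)
      subst ho
      simp only [List.cons_append, pvIv]
      rw [ih l2 (i + 1) (fun e he => h e (by simp [he]))]
      congr 1
      simp; omega

lemma pvMT_cons_skip (x : List String) (i : Nat) (ivs : List (Nat × Nat))
    (h : ∀ p ∈ ivs, i < p.1) (hi : i < x.length) :
    pvMT x i ivs = x.getD i "" :: pvMT x (i + 1) ivs := by
  cases ivs with
  | nil => simp only [pvMT]; exact pv_drop_eq_getD_cons' x i hi
  | cons pq rest =>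
      obtain ⟨p, q⟩ := pq
      have hp : i < p := h (p, q) (by simp)
      simp only [pvMT]
      rw [pv_drop_eq_getD_cons' x i hi]
      have : p - i = (p - (i + 1)) + 1 := by omega
      rw [this, List.take_succ_cons]
      simp

lemma pv_walk_eq (x : List String) : ∀ (N : Nat) (info : List (Option Nat)) (i : Nat),
    info.length ≤ N → pvGood info → i + info.length = x.length →
    pvMT x i (pvIv i info) = joinBracketsWalk x i info := by
  intro N
  induction N with
  | zero =>
      intro info i hN _ hlen
      have : info = [] := by
        cases info with
        | nil => rfl
        | cons a l => simp at hN
      subst this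
      simp only [pvIv, pvMT, joinBracketsWalk]
      simp at hlen
      simp [List.drop_of_length_le, hlen.ge]
  | succ N ih =>
      intro info i hN hgood hlen
      cases info with
      | nil =>
          simp only [pvIv, pvMT, joinBracketsWalk]
          simp at hlen
          simp [List.drop_of_length_le, hlen.ge]
      | cons o rest =>
          cases o with
          | none =>
              simp only [pvIv, joinBracketsWalk]
              have hi : i < x.length := by simp at hlen; omega
              rw [pvMT_cons_skip x i _ ?_ hi]
              · rw [ih rest (i + 1) (by simp at hN; omega) hgood (by simp at hlen ⊢; omega)]
                congr 1
                simp [hi]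
              · intro p hp
                have := pvIv_ge rest (i + 1) p hp
                omega
          | some d =>
              obtain ⟨hd, hnone, hgood'⟩ := hgood
              have htake : (rest.take d).length = d := by simp; omega
              have hsplit : rest = rest.take d ++ rest.drop d := (List.take_append_drop d rest).symm
              simp only [pvIv, joinBracketsWalk]
              rw [show pvIv (i + 1) rest = pvIv (i + d + 1) (rest.drop d) by
                    conv_lhs => rw [hsplit]
                    rw [pvIv_append_none _ _ _ hnone, htake]
                    congr 1
                    omega]
              simp only [pvMT]
              rw [ih (rest.drop d) (i + d + 1)
                    (by simp at hN ⊢; omega)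
                    (pvGood_drop rest hgood' d)
                    (by simp at hlen ⊢; omega)]
              have hslice : PySem.List.slice x (some (i : Int)) (some ((i + d + 1 : Nat) : Int))
                  = (x.drop i).take (d + 1) := by
                rw [PySem.List.slice_natCast]
                congr 1
                omega
              rw [hslice]
              have h1 : i - i = 0 := by omega
              have h2 : i + d + 1 - i = d + 1 := by omega
              simp [h1, h2]

lemma pv_fold_eq_mT (x : List String) : ∀ (ivs : List (Nat × Nat)) (s : Nat) (acc : List String),
    (let fin := (ivs.map (fun p => ((p.1 : Int), (p.2 : Int)))).foldl
        (fun (st : Int × List String) iv =>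
          (iv.2, st.2 ++ PySem.List.slice x (some st.1) (some iv.1)
            ++ [PySem.Str.join "" (PySem.List.slice x (some iv.1) (some iv.2))])) ((s : Int), acc)
     fin.2 ++ PySem.List.slice x (some fin.1) none) = acc ++ pvMT x s ivs := by
  intro ivs
  induction ivs with
  | nil =>
      intro s acc
      simp only [List.map_nil, List.foldl_nil]
      rw [PySem.List.slice_from_natCast]
      rfl
  | cons pq rest ih =>
      intro s acc
      obtain ⟨p, q⟩ := pq
      simp only [List.map_cons, List.foldl_cons]
      have := ih q (acc ++ PySem.List.slice x (some (s : Int)) (some (p : Int))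
        ++ [PySem.Str.join "" (PySem.List.slice x (some (p : Int)) (some (q : Int)))])
      simp only [] at this ⊢
      rw [this]
      simp only [pvMT, PySem.List.slice_natCast]
      simp [List.append_assoc]

lemma pv_alt_eq (x : List String) :
    join_brackets_alt x = pvMT x 0 (pvIv 0 (pvInfo x)) := by
  rw [join_brackets_alt, pvBuild_snd]
  exact (pv_walk_eq x (pvInfo x).length (pvInfo x) 0 le_rfl (pvGood_pvInfo x)
    (by simp [pvInfo_length])).symm

lemma pv_a_eq (x : List String) :
    join_brackets x = pvMT x 0 (pvIv 0 (pvInfo x)) := by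
  have h1 : ∀ (l : List Int) (acc : List (Int × Int)),
      l.foldl (fun bl a =>
        let xa := PySem.List.pyGetD x a ""
        if PySem.Str.isIn "(" xa then
          if PySem.Str.isIn ")" xa then bl
          else if (PySem.List.slice x (some a) none).any (fun term => PySem.Str.isIn ")" term) then
            let nextClosedBr : Int :=
              PySem.List.pyGetD
                (((PySem.List.enumerate ((PySem.List.slice x (some a) none).map
                    (fun term => PySem.Str.isIn ")" term)) 0).filter (fun p => p.2)).map
                  (fun p => p.1)) 0 0
            if ((PySem.List.slice x (some (a + 1)) (some (a + nextClosedBr + 1))).any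
                (fun term => PySem.Str.isIn "(" term)) = false then
              bl ++ [(a, a + nextClosedBr + 1)]
            else bl
          else bl
        else bl) acc = acc ++ l.filterMap (pvBodyI x) := by
    refine pv_foldl_opt (pvBodyI x) _ ?_
    intro acc a
    simp only [pvBodyI]
    split_ifs <;> simp
  have h2 : PySem.List.pyRange 0 (x.length : Int) 1
      = (List.range x.length).map (fun (k : Nat) => (k : Int)) := by
    rw [PySem.List.pyRange_one]
    simp only [sub_zero, Int.toNat_natCast, zero_add]
  have h3 : (List.range x.length).filterMap (fun (a : Nat) => pvBodyI x (a : Int))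
      = (pvIv 0 (pvInfo x)).map (fun p => ((p.1 : Int), (p.2 : Int))) := by
    have hcg : (List.range x.length).filterMap (fun (a : Nat) => pvBodyI x (a : Int))
        = (List.range x.length).filterMap
            (fun a => (pvBodyN x a).map (fun p => ((p.1 : Int), (p.2 : Int)))) :=
      List.filterMap_congr (fun a haa => pvBodyI_cast x a (List.mem_range.mp haa))
    rw [hcg, ← List.map_filterMap, pv_range_filterMap]
  simp only [join_brackets]
  rw [h1, List.nil_append, h2, List.filterMap_map]
  simp only [Function.comp_def]
  rw [h3]
  by_cases hbl : pvIv 0 (pvInfo x) = []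
  · rw [hbl]
    simp only [List.map_nil, ne_eq, not_true_eq_false, if_false]
    show x = pvMT x 0 []
    simp [pvMT]
  · rw [if_pos (by simp [hbl])]
    have h4 := pv_fold_eq_mT x (pvIv 0 (pvInfo x)) 0 []
    simp only [Nat.cast_zero, List.nil_append] at h4
    exact h4

-- ===== VERDICT (by name: the statement is the Claim_ definition above) =====
theorem join_brackets_spec : Claim_equal_join_brackets := by
  intro x _
  show join_brackets x = join_brackets_alt x
  rw [pv_a_eq, pv_alt_eq]
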